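-- pv_equiv track=rewrite | github.com/nastyh/LeetCode | Basic Data Structures/2071_max_number_of_tasks_you_can_assign.py | maxTaskAssign_manual_bisect
-- ===== SOURCE A (Python) =====
-- from typing import List
--
-- def maxTaskAssign_manual_bisect(tasks: List[int], workers: List[int], pills: int, strength: int) -> int:
--     """
--     same as above but implemented bisect_left manually
--     """
--
--     tasks.sort()
--     workers.sort()
--
--     def _bisect_left(a, x):
--         """
--         finds an insertion point for x in a
--         to maintain a sorted order
--         """
--         lo, hi = 0, len(a)
--         while lo < hi:
--             mid = (lo + hi) // 2
--             if a[mid] < x: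
--                 lo = mid + 1
--             else:
--                 hi = mid
--         return lo
--
--     def can(k: int) -> bool:
--         # pick k easiest tasks + k strongest workers
--         T = tasks[:k]
--         W = workers[len(workers)-k:]
--         pills_left = pills
--         # use a list for W
--         for t in reversed(T):
--             # try without pill
--             if W[-1] >= t:
--                 W.pop()
--             else:
--                 # need to use pill
--                 if pills_left == 0:
--                     return False
--                 # find worker with w+strength>=t: w>=t-strength
--                 needed = t - strength
--                 idx = _bisect_left(W, needed)
--                 if idx == len(W):  # no such worker
--                     return False
--                 # assign that worker
--                 W.pop(idx)
--                 pills_left -= 1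
--         return True
--
--
--     low, high = 0, min(len(tasks), len(workers))
--     while low < high:
--         mid = (low + high + 1) // 2
--         if can(mid):
--             low = mid
--         else:
--             high = mid - 1
--
--     return low
-- ===== SOURCE B (Python) =====
-- from typing import List
--
-- def maxTaskAssign_manual_bisect(tasks: List[int], workers: List[int], pills: int, strength: int) -> int:
--     """
--     Binary search on k with a sliding-window feasibility check:
--     walk the k strongest workers in ascending order, keep every still-pending
--     task the current worker could possibly do (bare, or with a pill) in a
--     window (list + head index); hand the easiest pending task to the worker
--     when no pill is needed, otherwise spend a pill on the hardest task in reach.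
--     """
--     tasks.sort()
--     workers.sort()
--     n, m = len(tasks), len(workers)
--     boost = strength if strength > 0 else 0   # a pill never helps if strength <= 0
--
--     def can(k: int) -> bool:
--         sel = tasks[:k]            # k easiest tasks, ascending
--         p = pills
--         buf = []                   # window of tasks already within reach
--         head = 0                   # buf[head:] is the pending window
--         j = 0                      # next task of sel to enter the window
--         for w in workers[m - k:]:  # k strongest workers, ascending
--             while j < k and sel[j] <= w + boost:
--                 buf.append(sel[j])
--                 j += 1
--             if head == len(buf):   # nothing this worker could ever do
--                 return False
--             if buf[head] <= w:     # easiest pending task, no pill needed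
--                 head += 1
--             else:                  # worker needs a pill for every pending task
--                 if p == 0:
--                     return False
--                 p -= 1
--                 buf.pop()          # give w the hardest task within its reach
--         return True
--
--     low, high = 0, min(n, m)
--     while low < high:
--         mid = (low + high + 1) // 2
--         if can(mid):
--             low = mid
--         else:
--             high = mid - 1
--     return low
-- ===== Notes on version B (the rewrite author's own statement) =====
-- stated objective: alternative
-- what changed: The feasibility check can(k) is re-implemented as a different greedy: instead of walking the tasks hardest-first and deleting workers from a sorted list with a hand-rolled bisect plus list.pop(idx), B walks the k strongest workers weakest-first keeping the still-reachable tasks in a sliding window (list + head index) with pops only at the two ends, assigning the easiest pending task bare or spending a pill on the hardest reachable one.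
import Mathlib
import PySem

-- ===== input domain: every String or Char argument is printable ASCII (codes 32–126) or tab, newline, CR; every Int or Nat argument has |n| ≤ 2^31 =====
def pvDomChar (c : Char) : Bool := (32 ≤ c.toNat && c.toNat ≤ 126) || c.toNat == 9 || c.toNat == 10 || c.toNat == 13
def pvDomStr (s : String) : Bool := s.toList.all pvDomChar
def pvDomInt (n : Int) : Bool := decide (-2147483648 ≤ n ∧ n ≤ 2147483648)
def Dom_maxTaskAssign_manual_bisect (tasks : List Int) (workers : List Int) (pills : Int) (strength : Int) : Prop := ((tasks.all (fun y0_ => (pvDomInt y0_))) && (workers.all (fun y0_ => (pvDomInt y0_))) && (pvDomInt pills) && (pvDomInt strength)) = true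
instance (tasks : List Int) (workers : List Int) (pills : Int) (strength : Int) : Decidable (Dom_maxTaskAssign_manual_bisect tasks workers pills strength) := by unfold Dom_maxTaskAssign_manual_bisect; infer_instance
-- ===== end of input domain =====

-- B replaces A's hardest-task-first bisect+pop feasibility check by a different greedy:
-- a sliding-window pass over the workers (objective: alternative).  Both Pythons sort
-- their list arguments in place (same mutation); the theorems are about the return value.

-- ===== PORT A =====
-- A's manual _bisect_left: while lo < hi loop; fuel (= a.length + 1 ≥ hi - lo) only makes
-- the same computation total, the loop always ends before the fuel runs out.
def pvABisectGo (a : List Int) (x : Int) : Nat → Int → Int → Int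
  | 0, lo, _ => lo
  | fuel + 1, lo, hi =>
    if lo < hi then
      let mid := PySem.Int.floordiv (lo + hi) 2
      -- a[mid] is always in range here (0 ≤ lo ≤ mid < hi ≤ len a at every call)
      if PySem.List.pyGetD a mid 0 < x then pvABisectGo a x fuel (mid + 1) hi
      else pvABisectGo a x fuel lo mid
    else lo

def pvABisect (a : List Int) (x : Int) : Int :=
  pvABisectGo a x (a.length + 1) 0 (a.length : Int)

-- the 'for t in reversed(T)' loop of A's can (W[-1], W.pop(), W.pop(idx) are always in range)
def pvACanGo (s : Int) : List Int → List Int → Int → Bool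
  | [], _, _ => true
  | t :: rest, W, p =>
    if t ≤ PySem.List.pyGetD W (-1) 0 then
      pvACanGo s rest ((PySem.List.pop? W (-1)).getD (0, W)).2 p
    else if p == 0 then false
    else
      let idx := pvABisect W (t - s)
      if idx == (W.length : Int) then false
      else pvACanGo s rest ((PySem.List.pop? W idx).getD (0, W)).2 (p - 1)

def pvACan (tasks workers : List Int) (pills s k : Int) : Bool :=
  let T := PySem.List.slice tasks none (some k)
  let W := PySem.List.slice workers (some ((workers.length : Int) - k)) none
  pvACanGo s T.reverse W pills

-- A's 'while low < high' binary search (fuel ≥ high - low, loop ends before it runs out)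
def pvASearch (tasks workers : List Int) (pills s : Int) : Nat → Int → Int → Int
  | 0, low, _ => low
  | fuel + 1, low, high =>
    if low < high then
      let mid := PySem.Int.floordiv (low + high + 1) 2
      if pvACan tasks workers pills s mid then pvASearch tasks workers pills s fuel mid high
      else pvASearch tasks workers pills s fuel low (mid - 1)
    else low

def maxTaskAssign_manual_bisect (tasks : List Int) (workers : List Int) (pills : Int) (strength : Int) : Int :=
  let ts := PySem.List.sorted tasks (fun x => x) false
  let ws := PySem.List.sorted workers (fun x => x) false
  pvASearch ts ws pills strength (min ts.length ws.length + 1) 0 (min (ts.length : Int) (ws.length : Int))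

-- ===== PORT B =====
-- Source B's inner 'while j < k and sel[j] <= w + boost' loop (fuel ≥ k - j; sel[j] in range at every call)
def pvBPushGo (sel : List Int) (k wb : Int) : Nat → Int → List Int → List Int × Int
  | 0, j, buf => (buf, j)
  | fuel + 1, j, buf =>
    if j < k then
      if PySem.List.pyGetD sel j 0 ≤ wb then
        pvBPushGo sel k wb fuel (j + 1) (buf ++ [PySem.List.pyGetD sel j 0])
      else (buf, j)
    else (buf, j)

-- Source B's 'for w in workers[m-k:]' loop; state: sel index j, window buf with head index, pills p
def pvBCanGo (s boost k : Int) : List Int → List Int → Int → List Int → Int → Int → Bool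
  | [], _, _, _, _, _ => true
  | w :: ws, sel, j, buf, head, p =>
    let r := pvBPushGo sel k (w + boost) (k.toNat + 1) j buf
    if head == (r.1.length : Int) then false
    else if PySem.List.pyGetD r.1 head 0 ≤ w then pvBCanGo s boost k ws sel r.2 r.1 (head + 1) p
    else if p == 0 then false
    else pvBCanGo s boost k ws sel r.2 ((PySem.List.pop? r.1 (-1)).getD (0, r.1)).2 head (p - 1)

def pvBCan (tasks workers : List Int) (pills s boost k : Int) : Bool :=
  let sel := PySem.List.slice tasks none (some k)
  let W := PySem.List.slice workers (some ((workers.length : Int) - k)) none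
  pvBCanGo s boost k W sel 0 [] 0 pills

def pvBSearch (tasks workers : List Int) (pills s boost : Int) : Nat → Int → Int → Int
  | 0, low, _ => low
  | fuel + 1, low, high =>
    if low < high then
      let mid := PySem.Int.floordiv (low + high + 1) 2
      if pvBCan tasks workers pills s boost mid then pvBSearch tasks workers pills s boost fuel mid high
      else pvBSearch tasks workers pills s boost fuel low (mid - 1)
    else low

def maxTaskAssign_manual_bisect_alt (tasks : List Int) (workers : List Int) (pills : Int) (strength : Int) : Int :=
  let ts := PySem.List.sorted tasks (fun x => x) false
  let ws := PySem.List.sorted workers (fun x => x) false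
  let boost : Int := if 0 < strength then strength else 0
  pvBSearch ts ws pills strength boost (min ts.length ws.length + 1) 0 (min (ts.length : Int) (ws.length : Int))

-- ===== PRECONDITION & SPEC =====
def Spec_maxTaskAssign_manual_bisect (tasks : List Int) (workers : List Int) (pills : Int) (strength : Int) (out : Int) : Prop := out = maxTaskAssign_manual_bisect_alt tasks workers pills strength
instance (tasks : List Int) (workers : List Int) (pills : Int) (strength : Int) (out : Int) : Decidable (Spec_maxTaskAssign_manual_bisect tasks workers pills strength out) := by unfold Spec_maxTaskAssign_manual_bisect; infer_instance

-- ===== CLAIM (what is proved, stated in full; the proofs are below) =====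
def Claim_equal_maxTaskAssign_manual_bisect : Prop := ∀ (tasks : List Int) (workers : List Int) (pills : Int) (strength : Int), Dom_maxTaskAssign_manual_bisect tasks workers pills strength → Spec_maxTaskAssign_manual_bisect tasks workers pills strength (maxTaskAssign_manual_bisect tasks workers pills strength)

-- ===== LEMMAS AND PROOFS =====

-- Both feasibility checks decide the same matching problem: a multiset M of (task, worker)
-- pairs using all tasks and all workers, each pair doable bare or with a pill, and (unless
-- pills < 0, which Python's 'p == 0' test treats as unlimited) at most `pills` pill pairs.
def pvPills (M : Multiset (Int × Int)) : Nat := Multiset.countP (fun q => q.2 < q.1) M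

def pvSpec (s : Int) (T W : Multiset Int) (p : Int) : Prop :=
  ∃ M : Multiset (Int × Int), M.map Prod.fst = T ∧ M.map Prod.snd = W ∧
    (∀ q ∈ M, q.1 ≤ q.2 ∨ q.1 ≤ q.2 + s) ∧ (p < 0 ∨ (pvPills M : Int) ≤ p)

-- ---- generic multiset matching lemmas ----

lemma pv_exists_pair_fst {M : Multiset (Int × Int)} {T : Multiset Int} {t : Int}
    (hf : M.map Prod.fst = T) (ht : t ∈ T) : ∃ w, (t, w) ∈ M := by
  rw [← hf] at ht
  obtain ⟨q, hq, hq1⟩ := Multiset.mem_map.1 ht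
  exact ⟨q.2, by rwa [show (t, q.2) = q by rw [← hq1]]⟩

lemma pv_exists_pair_snd {M : Multiset (Int × Int)} {W : Multiset Int} {w : Int}
    (hs : M.map Prod.snd = W) (hw : w ∈ W) : ∃ t, (t, w) ∈ M := by
  rw [← hs] at hw
  obtain ⟨q, hq, hq2⟩ := Multiset.mem_map.1 hw
  exact ⟨q.1, by rwa [show (q.1, w) = q by rw [← hq2]]⟩

lemma pvPills_cons (q : Int × Int) (M : Multiset (Int × Int)) :
    pvPills (q ::ₘ M) = pvPills M + (if q.2 < q.1 then 1 else 0) := by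
  simp [pvPills, Multiset.countP_cons]

-- peel one pair off a matching
lemma pv_peel {s p t w : Int} {M₁ : Multiset (Int × Int)} {T W : Multiset Int}
    (hf : ((t, w) ::ₘ M₁).map Prod.fst = T) (hs : ((t, w) ::ₘ M₁).map Prod.snd = W)
    (hv : ∀ q ∈ (t, w) ::ₘ M₁, q.1 ≤ q.2 ∨ q.1 ≤ q.2 + s)
    (hb : p < 0 ∨ (pvPills ((t, w) ::ₘ M₁) : Int) ≤ p) :
    pvSpec s (T.erase t) (W.erase w) (if w < t then p - 1 else p) := by
  refine ⟨M₁, ?_, ?_, fun q hq => hv q (Multiset.mem_cons_of_mem hq), ?_⟩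
  · rw [← hf, Multiset.map_cons, Multiset.erase_cons_head]
  · rw [← hs, Multiset.map_cons, Multiset.erase_cons_head]
  · have := pvPills_cons (t, w) M₁
    split_ifs with hp <;> rcases hb with hb | hb
    · exact Or.inl (by omega)
    · right; simp only [hp, if_pos] at this; omega
    · exact Or.inl hb
    · right; simp only [this, hp] at *; omega

lemma pv_cons {s p' t w : Int} {T' W' : Multiset Int}
    (hcap : t ≤ w ∨ t ≤ w + s)
    (h : pvSpec s T' W' p') {p : Int} (hp : p' = (if w < t then p - 1 else p))
    (hp0 : w < t → p ≠ 0) :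
    pvSpec s (t ::ₘ T') (w ::ₘ W') p := by
  obtain ⟨M, hf, hs, hv, hb⟩ := h
  refine ⟨(t, w) ::ₘ M, by simp [hf], by simp [hs], ?_, ?_⟩
  · intro q hq
    rcases Multiset.mem_cons.1 hq with rfl | hq
    · exact hcap
    · exact hv q hq
  · rw [pvPills_cons]
    subst hp
    by_cases hwt : w < t
    · simp only [hwt, if_pos] at *
      rcases hb with hb | hb
      · rcases lt_trichotomy p 0 with h0 | h0 | h0
        · exact Or.inl h0
        · exact absurd h0 (hp0 hwt)
        · right; omega
      · rcases lt_trichotomy p 0 with h0 | h0 | h0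
        · exact Or.inl h0
        · exact absurd h0 (hp0 hwt)
        · right; push_cast; omega
    · simp only [hwt, if_neg, not_false_iff] at *
      rcases hb with hb | hb
      · exact Or.inl hb
      · right; omega

-- the exchange workhorse: from any matching produce one that pairs t with w
lemma pv_rotate {s p : Int} {T W : Multiset Int} (t w : Int)
    (ht : t ∈ T) (hw : w ∈ W)
    (hcap : t ≤ w ∨ t ≤ w + s)
    (hval2 : ∀ t2 w0, t2 ∈ T.erase t → w0 ∈ W.erase w → (t ≤ w0 ∨ t ≤ w0 + s) →
       (t2 ≤ w ∨ t2 ≤ w + s) → (t2 ≤ w0 ∨ t2 ≤ w0 + s))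
    (hpill2 : ∀ t2 w0, t2 ∈ T.erase t → w0 ∈ W.erase w → (t ≤ w0 ∨ t ≤ w0 + s) →
       (t2 ≤ w ∨ t2 ≤ w + s) →
       ((if w < t then 1 else 0) + (if w0 < t2 then 1 else 0) : Nat) ≤
       (if w0 < t then 1 else 0) + (if w < t2 then 1 else 0))
    (h : pvSpec s T W p) :
    ∃ M₁ : Multiset (Int × Int),
      ((t, w) ::ₘ M₁).map Prod.fst = T ∧ ((t, w) ::ₘ M₁).map Prod.snd = W ∧
      (∀ q ∈ (t, w) ::ₘ M₁, q.1 ≤ q.2 ∨ q.1 ≤ q.2 + s) ∧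
      (p < 0 ∨ (pvPills ((t, w) ::ₘ M₁) : Int) ≤ p) := by
  obtain ⟨M, hf, hs, hv, hb⟩ := h
  obtain ⟨w0, hq1⟩ := pv_exists_pair_fst hf ht
  by_cases hww : w0 = w
  · subst hww
    refine ⟨M.erase (t, w0), ?_, ?_, ?_, ?_⟩ <;>
      rw [Multiset.cons_erase hq1] <;> first | exact hf | exact hs | exact hv | exact hb
  · -- w sits in some other pair (t2, w) of M; swap partners
    set M₁ := M.erase (t, w0) with hM₁
    have hM : (t, w0) ::ₘ M₁ = M := Multiset.cons_erase hq1
    have hsnd₁ : M₁.map Prod.snd = W.erase w0 := by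
      have : w0 ::ₘ M₁.map Prod.snd = W := by rw [← hs, ← hM, Multiset.map_cons]
      rw [← this, Multiset.erase_cons_head]
    have hfst₁ : M₁.map Prod.fst = T.erase t := by
      have : t ::ₘ M₁.map Prod.fst = T := by rw [← hf, ← hM, Multiset.map_cons]
      rw [← this, Multiset.erase_cons_head]
    have hwmem : w ∈ M₁.map Prod.snd := by
      rw [hsnd₁]
      exact Multiset.mem_erase_of_ne (fun h => hww h.symm) |>.2 hw
    obtain ⟨t2, hq2⟩ := pv_exists_pair_snd rfl hwmem
    set M₂ := M₁.erase (t2, w) with hM₂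
    have hM' : (t2, w) ::ₘ M₂ = M₁ := Multiset.cons_erase hq2
    -- memberships and validity facts
    have hvq1 : t ≤ w0 ∨ t ≤ w0 + s := hv _ (by rw [← hM]; exact Multiset.mem_cons_self _ _)
    have hvq2 : t2 ≤ w ∨ t2 ≤ w + s := by
      have : (t2, w) ∈ M := by rw [← hM]; exact Multiset.mem_cons_of_mem (by rw [← hM']; exact Multiset.mem_cons_self _ _)
      exact hv _ this
    have ht2T : t2 ∈ T.erase t := by
      rw [← hfst₁, ← hM', Multiset.map_cons]; exact Multiset.mem_cons_self _ _
    have hw0W : w0 ∈ W.erase w := by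
      have hfst₂ : M₂.map Prod.fst = (T.erase t).erase t2 := by
        have : t2 ::ₘ M₂.map Prod.fst = T.erase t := by rw [← hfst₁, ← hM', Multiset.map_cons]
        rw [← this, Multiset.erase_cons_head]
      have hsnd₂ : w ::ₘ M₂.map Prod.snd = W.erase w0 := by
        rw [← hsnd₁, ← hM', Multiset.map_cons]
      -- W.erase w = w0 ::ₘ M₂.map snd
      have hWw : W.erase w = w0 ::ₘ M₂.map Prod.snd := by
        have h1 : W = w0 ::ₘ (w ::ₘ M₂.map Prod.snd) := by
          rw [hsnd₂, ← hsnd₁]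
          rw [← hs, ← hM, Multiset.map_cons]
        rw [h1, Multiset.erase_cons_tail _ (by simpa using hww), Multiset.erase_cons_head]
      rw [hWw]; exact Multiset.mem_cons_self _ _
    refine ⟨(t2, w0) ::ₘ M₂, ?_, ?_, ?_, ?_⟩
    · rw [Multiset.map_cons, Multiset.map_cons]
      have : t2 ::ₘ M₂.map Prod.fst = M₁.map Prod.fst := by rw [← hM', Multiset.map_cons]
      rw [show ((t,w).1 ::ₘ (t2, w0).1 ::ₘ M₂.map Prod.fst : Multiset Int) = t ::ₘ t2 ::ₘ M₂.map Prod.fst from rfl]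
      rw [this, hfst₁, Multiset.cons_erase ht]
    · rw [Multiset.map_cons, Multiset.map_cons]
      have h1 : W = w0 ::ₘ w ::ₘ M₂.map Prod.snd := by
        rw [← hs, ← hM, Multiset.map_cons, ← hM', Multiset.map_cons]
      rw [h1]
      exact Multiset.cons_swap _ _ _ |>.symm ▸ rfl
    · intro q hq
      rcases Multiset.mem_cons.1 hq with rfl | hq
      · exact hcap
      rcases Multiset.mem_cons.1 hq with rfl | hq
      · exact hval2 t2 w0 ht2T hw0W hvq1 hvq2
      · exact hv q (by rw [← hM]; exact Multiset.mem_cons_of_mem (by rw [← hM']; exact Multiset.mem_cons_of_mem hq))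
    · have hcount : pvPills ((t, w) ::ₘ (t2, w0) ::ₘ M₂) ≤ pvPills M := by
        rw [← hM, ← hM']
        rw [pvPills_cons, pvPills_cons, pvPills_cons, pvPills_cons]
        have := hpill2 t2 w0 ht2T hw0W hvq1 hvq2
        simp only at *
        omega
      rcases hb with hb | hb
      · exact Or.inl hb
      · right; calc ((pvPills ((t,w) ::ₘ (t2,w0) ::ₘ M₂)) : Int) ≤ (pvPills M : Int) := by exact_mod_cast hcount
          _ ≤ p := hb

-- ---- the four greedy steps, as equivalences of the matching spec ----

lemma pv_stepA_nopill {s p t w : Int} {T' W : Multiset Int}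
    (hmaxT : ∀ t' ∈ T', t' ≤ t) (hw : w ∈ W) (hmaxW : ∀ w' ∈ W, w' ≤ w) (htw : t ≤ w) :
    pvSpec s (t ::ₘ T') W p ↔ pvSpec s T' (W.erase w) p := by
  constructor
  · intro h
    obtain ⟨M₁, hf, hs', hv, hb⟩ := pv_rotate t w (Multiset.mem_cons_self _ _) hw (Or.inl htw)
      (by
        intro t2 w0 ht2 hw0 h1 h2
        have ht2' : t2 ≤ t := hmaxT t2 (by rwa [Multiset.erase_cons_head] at ht2)
        omega)
      (by
        intro t2 w0 ht2 hw0 h1 h2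
        have ht2' : t2 ≤ t := hmaxT t2 (by rwa [Multiset.erase_cons_head] at ht2)
        split_ifs <;> omega) h
    have := pv_peel hf hs' hv hb
    rw [Multiset.erase_cons_head, if_neg (by omega)] at this
    exact this
  · intro h
    have := pv_cons (p := p) (Or.inl htw) h (by rw [if_neg (by omega)]) (by omega)
    rwa [Multiset.cons_erase hw] at this

lemma pv_stepA_pill {s p t c : Int} {T' W : Multiset Int}
    (hmaxT : ∀ t' ∈ T', t' ≤ t) (hc : c ∈ W) (hcge : t - s ≤ c)
    (hmin : ∀ w' ∈ W, t - s ≤ w' → c ≤ w')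
    (hmaxW : ∀ w' ∈ W, w' < t) (hp : p ≠ 0) :
    pvSpec s (t ::ₘ T') W p ↔ pvSpec s T' (W.erase c) (p - 1) := by
  have hct : c < t := hmaxW c hc
  constructor
  · intro h
    obtain ⟨M₁, hf, hs', hv, hb⟩ := pv_rotate t c (Multiset.mem_cons_self _ _) hc (Or.inr (by omega))
      (by
        intro t2 w0 ht2 hw0 h1 h2
        have hw0t : w0 < t := hmaxW w0 (Multiset.mem_of_mem_erase hw0)
        have hcw0 : c ≤ w0 := hmin w0 (Multiset.mem_of_mem_erase hw0) (by omega)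
        omega)
      (by
        intro t2 w0 ht2 hw0 h1 h2
        have hw0t : w0 < t := hmaxW w0 (Multiset.mem_of_mem_erase hw0)
        have hcw0 : c ≤ w0 := hmin w0 (Multiset.mem_of_mem_erase hw0) (by omega)
        split_ifs <;> omega) h
    have := pv_peel hf hs' hv hb
    rw [Multiset.erase_cons_head, if_pos hct] at this
    exact this
  · intro h
    have := pv_cons (p := p) (Or.inr (show t ≤ c + s by omega)) h (by rw [if_pos hct]) (fun _ => hp)
    rwa [Multiset.cons_erase hc] at this

lemma pv_stepB_nopill {s p t w : Int} {T W : Multiset Int}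
    (ht : t ∈ T) (hminT : ∀ t' ∈ T, t ≤ t') (hw : w ∈ W) (hminW : ∀ w' ∈ W, w ≤ w')
    (htw : t ≤ w) :
    pvSpec s T W p ↔ pvSpec s (T.erase t) (W.erase w) p := by
  constructor
  · intro h
    obtain ⟨M₁, hf, hs', hv, hb⟩ := pv_rotate t w ht hw (Or.inl htw)
      (by
        intro t2 w0 ht2 hw0 h1 h2
        have : w ≤ w0 := hminW w0 (Multiset.mem_of_mem_erase hw0)
        omega)
      (by
        intro t2 w0 ht2 hw0 h1 h2
        have hww0 : w ≤ w0 := hminW w0 (Multiset.mem_of_mem_erase hw0)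
        have htt2 : t ≤ t2 := hminT t2 (Multiset.mem_of_mem_erase ht2)
        split_ifs <;> omega) h
    have := pv_peel hf hs' hv hb
    rwa [if_neg (by omega)] at this
  · intro h
    have := pv_cons (p := p) (Or.inl htw) h (by rw [if_neg (by omega)]) (by omega)
    rwa [Multiset.cons_erase ht, Multiset.cons_erase hw] at this

lemma pv_stepB_pill {s p t1 w : Int} {T W : Multiset Int}
    (hw : w ∈ W) (hminW : ∀ w' ∈ W, w ≤ w') (hwt : ∀ t' ∈ T, w < t')
    (ht1 : t1 ∈ T) (hcap : t1 ≤ w + s)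
    (hmax1 : ∀ t' ∈ T, (t' ≤ w ∨ t' ≤ w + s) → t' ≤ t1) (hp : p ≠ 0) :
    pvSpec s T W p ↔ pvSpec s (T.erase t1) (W.erase w) (p - 1) := by
  have hwt1 : w < t1 := hwt t1 ht1
  constructor
  · intro h
    obtain ⟨M₁, hf, hs', hv, hb⟩ := pv_rotate t1 w ht1 hw (Or.inr hcap)
      (by
        intro t2 w0 ht2 hw0 h1 h2
        have : t2 ≤ t1 := hmax1 t2 (Multiset.mem_of_mem_erase ht2) h2
        omega)
      (by
        intro t2 w0 ht2 hw0 h1 h2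
        have h21 : t2 ≤ t1 := hmax1 t2 (Multiset.mem_of_mem_erase ht2) h2
        have hwt2 : w < t2 := hwt t2 (Multiset.mem_of_mem_erase ht2)
        split_ifs <;> omega) h
    have := pv_peel hf hs' hv hb
    rwa [if_pos hwt1] at this
  · intro h
    have := pv_cons (p := p) (Or.inr hcap) h (by rw [if_pos hwt1]) (fun _ => hp)
    rwa [Multiset.cons_erase ht1, Multiset.cons_erase hw] at this

-- ---- failure cases ----

lemma pv_fail_t_nocap {s p t : Int} {T W : Multiset Int}
    (ht : t ∈ T) (h : ∀ w ∈ W, w + s < t ∧ w < t) : ¬ pvSpec s T W p := by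
  rintro ⟨M, hf, hs', hv, -⟩
  obtain ⟨w0, hq⟩ := pv_exists_pair_fst hf ht
  have hw0 : w0 ∈ W := by
    rw [← hs']; exact Multiset.mem_map.2 ⟨(t, w0), hq, rfl⟩
  have := hv _ hq
  have := h w0 hw0
  simp only at this ⊢
  omega

lemma pv_fail_w_nocap {s p w : Int} {T W : Multiset Int}
    (hw : w ∈ W) (h : ∀ t ∈ T, w + s < t ∧ w < t) : ¬ pvSpec s T W p := by
  rintro ⟨M, hf, hs', hv, -⟩
  obtain ⟨t0, hq⟩ := pv_exists_pair_snd hs' hw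
  have ht0 : t0 ∈ T := by
    rw [← hf]; exact Multiset.mem_map.2 ⟨(t0, w), hq, rfl⟩
  have := hv _ hq
  have := h t0 ht0
  simp only at this ⊢
  omega

lemma pv_fail_t_nopill {s t : Int} {T W : Multiset Int}
    (ht : t ∈ T) (h : ∀ w ∈ W, w < t) : ¬ pvSpec s T W 0 := by
  rintro ⟨M, hf, hs', hv, hb⟩
  obtain ⟨w0, hq⟩ := pv_exists_pair_fst hf ht
  have hw0 : w0 ∈ W := by
    rw [← hs']; exact Multiset.mem_map.2 ⟨(t, w0), hq, rfl⟩
  have hpos : 0 < pvPills M := by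
    rw [pvPills, Multiset.countP_pos]
    exact ⟨(t, w0), hq, h w0 hw0⟩
  rcases hb with hb | hb <;> omega

lemma pv_fail_w_nopill {s w : Int} {T W : Multiset Int}
    (hw : w ∈ W) (h : ∀ t ∈ T, w < t) : ¬ pvSpec s T W 0 := by
  rintro ⟨M, hf, hs', hv, hb⟩
  obtain ⟨t0, hq⟩ := pv_exists_pair_snd hs' hw
  have ht0 : t0 ∈ T := by
    rw [← hf]; exact Multiset.mem_map.2 ⟨(t0, w), hq, rfl⟩
  have hpos : 0 < pvPills M := by
    rw [pvPills, Multiset.countP_pos]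
    exact ⟨(t0, w), hq, h t0 ht0⟩
  rcases hb with hb | hb <;> omega

lemma pv_spec_nil_nil (s p : Int) : pvSpec s 0 0 p := by
  refine ⟨0, by simp, by simp, by simp, ?_⟩
  simp only [pvPills, Multiset.countP_zero, Nat.cast_zero]
  omega

-- ---- sorted-list utilities ----

lemma pv_sorted_le_of_le {a : List Int} (hs : a.Pairwise (· ≤ ·)) {i j : Nat}
    (hij : i ≤ j) (hj : j < a.length) : a[i]'(lt_of_le_of_lt (by omega) hj) ≤ a[j] := by
  rcases Nat.eq_or_lt_of_le hij with rfl | hlt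
  · rfl
  · exact List.pairwise_iff_getElem.mp hs i j _ hj hlt

lemma pv_coe_eraseIdx (l : List Int) (n : Nat) (h : n < l.length) :
    (↑(l.eraseIdx n) : Multiset Int) = (↑l : Multiset Int).erase (l[n]) := by
  have hp : List.Perm (l[n] :: l.eraseIdx n) l := List.getElem_cons_eraseIdx_perm h
  have : (↑l : Multiset Int) = (↑(l[n] :: l.eraseIdx n) : Multiset Int) :=
    (Multiset.coe_eq_coe.2 hp).symm
  rw [this, ← Multiset.cons_coe, Multiset.erase_cons_head]

lemma pv_sorted_le_getLast {l : List Int} (hs : l.Pairwise (· ≤ ·)) (h : l ≠ []) :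
    ∀ x ∈ l, x ≤ l.getLast h := by
  intro x hx
  have hcons := List.dropLast_concat_getLast h
  rw [← hcons] at hs hx
  rcases List.mem_append.1 hx with hx | hx
  · exact (List.pairwise_append.1 hs).2.2 x hx _ (List.mem_singleton_self _)
  · rw [List.mem_singleton.1 hx]

lemma pv_coe_getLast_cons {l : List Int} (h : l ≠ []) :
    (↑l : Multiset Int) = l.getLast h ::ₘ (↑l.dropLast : Multiset Int) := by
  rw [Multiset.cons_coe, Multiset.coe_eq_coe]
  have h1 : l = l.dropLast ++ [l.getLast h] := (List.dropLast_concat_getLast h).symm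
  exact h1 ▸ (List.perm_append_singleton _ _) |>.symm |>.symm

lemma pv_sorted_dropWhile_gt (c : Int) : ∀ (l : List Int), l.Pairwise (· ≤ ·) →
    ∀ x ∈ l.dropWhile (fun y => decide (y ≤ c)), c < x := by
  intro l
  induction l with
  | nil => intro _ x hx; simp at hx
  | cons a l ih =>
    intro hs x hx
    rw [List.dropWhile_cons] at hx
    by_cases hac : a ≤ c
    · rw [if_pos (by simpa using hac)] at hx
      exact ih (List.pairwise_cons.1 hs).2 x hx
    · rw [if_neg (by simpa using hac)] at hx
      rcases List.mem_cons.1 hx with rfl | hx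
      · omega
      · have := (List.pairwise_cons.1 hs).1 x hx
        omega

lemma pv_drop_dropLast (l : List Int) (n : Nat) :
    l.dropLast.drop n = (l.drop n).dropLast := by
  rw [List.dropLast_eq_take, List.drop_take, List.dropLast_eq_take, List.length_drop]
  congr 1
  omega

-- ---- A's manual bisect: characterization on a sorted list ----

lemma pvABisectGo_spec {a : List Int} {x : Int} (hs : a.Pairwise (· ≤ ·)) :
    ∀ (fuel : Nat) (lo hi : Int), 0 ≤ lo → lo ≤ hi → hi ≤ (a.length : Int) →
    (hi - lo).toNat ≤ fuel →
    (∀ (i : Nat) (h : i < a.length), (i : Int) < lo → a[i] < x) →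
    (∀ (i : Nat) (h : i < a.length), hi ≤ (i : Int) → x ≤ a[i]) →
    0 ≤ pvABisectGo a x fuel lo hi ∧ pvABisectGo a x fuel lo hi ≤ (a.length : Int) ∧
      (∀ (i : Nat) (h : i < a.length), (i : Int) < pvABisectGo a x fuel lo hi → a[i] < x) ∧
      (∀ (i : Nat) (h : i < a.length), pvABisectGo a x fuel lo hi ≤ (i : Int) → x ≤ a[i]) := by
  intro fuel
  induction fuel with
  | zero =>
    intro lo hi h0 hlh hhl hf h1 h2
    have : lo = hi := by omega
    subst this
    exact ⟨h0, hhl, h1, h2⟩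
  | succ fuel ih =>
    intro lo hi h0 hlh hhl hf h1 h2
    rw [pvABisectGo]
    by_cases hlt : lo < hi
    · rw [if_pos hlt]
      set mid := PySem.Int.floordiv (lo + hi) 2 with hmid
      have hb := PySem.Int.floordiv_two_mid_bounds (lo := lo) (hi := hi) (by omega)
      have hmhi : mid < hi := by
        rw [hmid, PySem.Int.floordiv_lt_iff_lt_mul (by omega)]
        omega
      have hmrange : mid.toNat < a.length := by omega
      have hgd : PySem.List.pyGetD a mid 0 = a[mid.toNat]'(by omega) :=
        PySem.List.pyGetD_eq_getElem a 0 (by omega) (by exact_mod_cast (by omega : mid < (a.length : Int)))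
      by_cases hcmp : PySem.List.pyGetD a mid 0 < x
      · rw [if_pos hcmp]
        refine ih (mid + 1) hi (by omega) (by omega) hhl (by omega) ?_ h2
        intro i h hi'
        have : a[i] ≤ a[mid.toNat] := pv_sorted_le_of_le hs (by omega) hmrange
        rw [hgd] at hcmp
        omega
      · rw [if_neg hcmp]
        refine ih lo mid (by omega) (by omega) (by omega) (by omega) h1 ?_
        intro i h hi'
        have : a[mid.toNat] ≤ a[i] := pv_sorted_le_of_le hs (by omega) h
        rw [hgd] at hcmp
        omega
    · rw [if_neg hlt]
      have : lo = hi := by omega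
      subst this
      exact ⟨h0, hhl, h1, h2⟩

lemma pvABisect_spec {a : List Int} {x : Int} (hs : a.Pairwise (· ≤ ·)) :
    0 ≤ pvABisect a x ∧ pvABisect a x ≤ (a.length : Int) ∧
      (∀ (i : Nat) (h : i < a.length), (i : Int) < pvABisect a x → a[i] < x) ∧
      (∀ (i : Nat) (h : i < a.length), pvABisect a x ≤ (i : Int) → x ≤ a[i]) := by
  exact pvABisectGo_spec hs (a.length + 1) 0 (a.length : Int) (by omega) (by omega) (by omega)
    (by omega) (by intro i h hi; omega) (by intro i h hi; omega)

-- ---- A's can-loop decides the matching spec ----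

lemma pvACanGo_iff (s : Int) : ∀ (D : List Int) (W : List Int) (p : Int),
    D.Pairwise (fun a b => b ≤ a) → W.Pairwise (· ≤ ·) → D.length = W.length →
    (pvACanGo s D W p = true ↔ pvSpec s (↑D) (↑W) p) := by
  intro D
  induction D with
  | nil =>
    intro W p _ _ hlen
    have hW : W = [] := List.length_eq_zero_iff.1 hlen.symm
    subst hW
    simp only [pvACanGo, Multiset.coe_nil]
    exact iff_of_true (by simp) (pv_spec_nil_nil s p)
  | cons t rest ih =>
    intro W p hD hW hlen
    have hWne : W ≠ [] := by
      intro h; subst h; simp at hlen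
    have hrestD : rest.Pairwise (fun a b => b ≤ a) := (List.pairwise_cons.1 hD).2
    have hmaxT : ∀ t' ∈ rest, t' ≤ t := (List.pairwise_cons.1 hD).1
    set L := W.getLast hWne with hL
    have hmaxW : ∀ w' ∈ W, w' ≤ L := pv_sorted_le_getLast hW hWne
    have hcoeW : (↑W : Multiset Int) = L ::ₘ (↑W.dropLast : Multiset Int) :=
      pv_coe_getLast_cons hWne
    have hcoeD : (↑(t :: rest) : Multiset Int) = t ::ₘ (↑rest : Multiset Int) :=
      (Multiset.cons_coe t rest).symm
    rw [pvACanGo]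
    rw [PySem.List.pyGetD_neg_one W 0 hWne, ← hL]
    by_cases hbr : t ≤ L
    · rw [if_pos hbr]
      have hpop : ((PySem.List.pop? W (-1)).getD (0, W)).2 = W.dropLast := by
        conv_lhs => rw [← List.dropLast_concat_getLast hWne]
        rw [PySem.List.pop?_last]
        rfl
      rw [hpop]
      have hiff := ih W.dropLast p hrestD (hW.sublist (List.dropLast_sublist W))
        (by rw [List.length_dropLast]; simp at hlen ⊢; omega)
      rw [hiff, hcoeD]
      have hstep := pv_stepA_nopill (s := s) (p := p) (T' := (↑rest : Multiset Int))
        (W := (↑W : Multiset Int)) hmaxT (by exact_mod_cast List.getLast_mem hWne)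
        (by intro w' hw'; exact hmaxW w' (by exact_mod_cast hw')) hbr
      rw [hstep, hcoeW, Multiset.erase_cons_head]
    · rw [if_neg hbr]
      have hallW : ∀ w' ∈ W, w' < t := fun w' hw' => by have := hmaxW w' hw'; omega
      by_cases hp0 : p = 0
      · rw [if_pos (by simpa using hp0)]
        refine iff_of_false (by simp) ?_
        subst hp0
        exact pv_fail_t_nopill (t := t) (by simp) (by intro w' hw'; exact hallW w' (by exact_mod_cast hw'))
      · rw [if_neg (by simpa using hp0)]
        obtain ⟨hge0, hlelen, hbelow, habove⟩ := pvABisect_spec (x := t - s) hW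
        by_cases hidx : pvABisect W (t - s) = (W.length : Int)
        · rw [if_pos (by simpa using hidx)]
          refine iff_of_false (by simp) ?_
          refine pv_fail_t_nocap (t := t) (by simp) ?_
          intro w' hw'
          obtain ⟨i, hi, rfl⟩ := List.mem_iff_getElem.1 (by exact_mod_cast hw')
          have := hbelow i hi (by omega)
          have := hallW _ (List.getElem_mem hi)
          omega
        · rw [if_neg (by simpa using hidx)]
          set idx := pvABisect W (t - s) with hidxdef
          have hlt : idx.toNat < W.length := by omega
          set c := W[idx.toNat] with hc
          have hpop : ((PySem.List.pop? W idx).getD (0, W)).2 = W.eraseIdx idx.toNat := by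
            rw [show idx = ((idx.toNat : Nat) : Int) by omega, PySem.List.pop?_natCast W idx.toNat hlt]
            rfl
          rw [hpop]
          have hiff := ih (W.eraseIdx idx.toNat) (p - 1) hrestD
            (hW.sublist (List.eraseIdx_sublist W idx.toNat))
            (by rw [List.length_eraseIdx_of_lt hlt]; simp at hlen ⊢; omega)
          rw [hiff, hcoeD]
          have hstep := pv_stepA_pill (s := s) (p := p) (T' := (↑rest : Multiset Int))
            (W := (↑W : Multiset Int)) (c := c) hmaxT
            (by exact_mod_cast List.getElem_mem hlt)
            (by have := habove idx.toNat hlt (by omega); omega)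
            ?_ (by intro w' hw'; exact hallW w' (by exact_mod_cast hw')) hp0
          · rw [hstep, pv_coe_eraseIdx W idx.toNat hlt]
          · intro w' hw' hwge
            obtain ⟨j, hj, rfl⟩ := List.mem_iff_getElem.1 (by exact_mod_cast hw' : w' ∈ W)
            by_cases hji : (j : Int) < idx
            · have := hbelow j hj hji
              omega
            · exact pv_sorted_le_of_le hW (by omega) hj

-- ---- Source B's push loop: appends the takeWhile-prefix of the unseen tasks ----

lemma pvBPushGo_spec (wb : Int) (sel : List Int) : ∀ (fuel : Nat) (j : Int) (buf : List Int),
    0 ≤ j → (sel.length : Int) - j ≤ (fuel : Int) →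
    pvBPushGo sel (sel.length : Int) wb fuel j buf =
      (buf ++ (sel.drop j.toNat).takeWhile (fun y => decide (y ≤ wb)),
       j + (((sel.drop j.toNat).takeWhile (fun y => decide (y ≤ wb))).length : Int)) := by
  intro fuel
  induction fuel with
  | zero =>
    intro j buf hj hf
    have : sel.drop j.toNat = [] := List.drop_eq_nil_of_le (by omega)
    rw [pvBPushGo, this]
    simp
  | succ fuel ih =>
    intro j buf hj hf
    rw [pvBPushGo]
    by_cases hjk : j < (sel.length : Int)
    · rw [if_pos hjk]
      have hjr : j.toNat < sel.length := by omega
      have hgd : PySem.List.pyGetD sel j 0 = sel[j.toNat] :=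
        PySem.List.pyGetD_eq_getElem sel 0 hj (by exact_mod_cast hjk)
      have hdrop : sel.drop j.toNat = sel[j.toNat] :: sel.drop (j.toNat + 1) :=
        List.drop_eq_getElem_cons hjr
      by_cases hle : sel[j.toNat] ≤ wb
      · rw [if_pos (by rw [hgd]; exact hle)]
        rw [hgd, ih (j + 1) (buf ++ [sel[j.toNat]]) (by omega) (by omega)]
        have hto : (j + 1).toNat = j.toNat + 1 := by omega
        rw [hto, hdrop, List.takeWhile_cons, if_pos (by simpa using hle)]
        simp only [Prod.mk.injEq]
        refine ⟨by simp, by simp only [List.length_cons]; push_cast; omega⟩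
      · rw [if_neg (by rw [hgd]; exact hle)]
        rw [hdrop, List.takeWhile_cons, if_neg (by simpa using hle)]
        simp
    · rw [if_neg hjk]
      have : sel.drop j.toNat = [] := List.drop_eq_nil_of_le (by omega)
      rw [this]
      simp

-- ---- B's can-loop decides the matching spec ----

lemma pvBCanGo_iff (s boost : Int) (hbo : boost = if 0 < s then s else 0) (sel : List Int) :
    ∀ (ws : List Int) (j : Int) (buf : List Int) (head p : Int),
    ws.Pairwise (· ≤ ·) → 0 ≤ j → 0 ≤ head → head.toNat ≤ buf.length →
    (buf.drop head.toNat ++ sel.drop j.toNat).Pairwise (· ≤ ·) →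
    (∀ a ∈ buf.drop head.toNat, ∀ w' ∈ ws, a ≤ w' + boost) →
    ((buf.drop head.toNat).length : Int) + ((sel.drop j.toNat).length : Int) = (ws.length : Int) →
    (pvBCanGo s boost (sel.length : Int) ws sel j buf head p = true ↔
      pvSpec s (↑(buf.drop head.toNat ++ sel.drop j.toNat)) (↑ws) p) := by
  have hboost0 : 0 ≤ boost := by rw [hbo]; split_ifs <;> omega
  have hboosts : s ≤ boost := by rw [hbo]; split_ifs <;> omega
  intro ws
  induction ws with
  | nil =>
    intro j buf head p _ hj hh hhb hsort hbound hlen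
    have h0 : ((buf.drop head.toNat).length : Int) = 0 ∧ ((sel.drop j.toNat).length : Int) = 0 := by
      simp only [List.length_nil, Nat.cast_zero] at hlen
      omega
    have h1 : buf.drop head.toNat = [] := List.eq_nil_of_length_eq_zero (by omega)
    have h2 : sel.drop j.toNat = [] := List.eq_nil_of_length_eq_zero (by omega)
    rw [h1, h2]
    simp only [pvBCanGo, List.nil_append, Multiset.coe_nil]
    exact iff_of_true (by simp) (pv_spec_nil_nil s p)
  | cons w ws' ih =>
    intro j buf head p hws hj hh hhb hsort hbound hlen
    have hwmin : ∀ w' ∈ ws', w ≤ w' := (List.pairwise_cons.1 hws).1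
    have hws' : ws'.Pairwise (· ≤ ·) := (List.pairwise_cons.1 hws).2
    set A := buf.drop head.toNat with hA
    set Rm := sel.drop j.toNat with hRm
    set tw := Rm.takeWhile (fun y => decide (y ≤ w + boost)) with htw
    set Rm' := Rm.dropWhile (fun y => decide (y ≤ w + boost)) with hRm'
    have htwRm : tw ++ Rm' = Rm := List.takeWhile_append_dropWhile
    have hRmsorted : Rm.Pairwise (· ≤ ·) := (List.pairwise_append.1 hsort).2.1
    have hAsorted : A.Pairwise (· ≤ ·) := (List.pairwise_append.1 hsort).1
    have hRm'gt : ∀ x ∈ Rm', w + boost < x := pv_sorted_dropWhile_gt (w + boost) Rm hRmsorted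
    have htwle : ∀ x ∈ tw, x ≤ w + boost := by
      intro x hx
      have := List.mem_takeWhile_imp hx
      simpa using this
    rw [pvBCanGo]
    rw [pvBPushGo_spec (w + boost) sel (((sel.length : Int)).toNat + 1) j buf hj (by omega)]
    simp only [← hRm, ← htw]
    set buf' := buf ++ tw with hbuf'
    set j' := j + (tw.length : Int) with hj'
    have hA' : buf'.drop head.toNat = A ++ tw := by
      rw [hbuf', List.drop_append_of_le_length hhb]
    have hRm'' : sel.drop j'.toNat = Rm' := by
      have h1 : j'.toNat = j.toNat + tw.length := by omega
      rw [h1, ← List.drop_drop, ← hRm, ← htwRm, List.drop_left]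
    have hR : (A ++ tw) ++ Rm' = A ++ Rm := by rw [List.append_assoc, htwRm]
    have hboundA' : ∀ a ∈ A ++ tw, ∀ w' ∈ w :: ws', a ≤ w' + boost := by
      intro a ha w' hw'
      rcases List.mem_append.1 ha with ha | ha
      · exact hbound a ha w' hw'
      · have h1 := htwle a ha
        rcases List.mem_cons.1 hw' with rfl | hw'
        · omega
        · have := hwmin w' hw'; omega
    by_cases hempty : head = ((buf'.length : Int))
    · rw [if_pos (by simpa using hempty)]
      have hAe : A ++ tw = [] := by
        apply List.eq_nil_of_length_eq_zero
        rw [← hA', List.length_drop]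
        omega
      refine iff_of_false (by simp) ?_
      refine pv_fail_w_nocap (w := w) (by simp) ?_
      intro t ht
      have ht' : t ∈ Rm' := by
        have hlist : t ∈ A ++ Rm := by exact_mod_cast ht
        rwa [← hR, hAe, List.nil_append] at hlist
      have := hRm'gt t ht'
      constructor <;> omega
    · rw [if_neg (by simpa using hempty)]
      have hhlt : head.toNat < buf'.length := by
        rw [hbuf'] at hempty ⊢
        simp only [List.length_append] at hempty ⊢
        omega
      have hhlt2 : head.toNat < buf.length + tw.length := by
        rw [hbuf', List.length_append] at hhlt
        exact hhlt
      have hAne : A ++ tw ≠ [] := by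
        intro hcon
        have := congrArg List.length hA'
        rw [hcon, List.length_drop] at this
        simp at this
        omega
      have hdne : buf'.drop head.toNat ≠ [] := by rw [hA']; exact hAne
      set t0 := buf'[head.toNat]'hhlt with ht0
      have hgd : PySem.List.pyGetD buf' head 0 = t0 :=
        PySem.List.pyGetD_eq_getElem buf' 0 hh (by omega)
      have ht0A : (A ++ tw).head hAne = t0 := by
        rw [ht0, ← List.head_drop hdne]
        congr 1
        exact hA'.symm
      have ht0head : (A ++ tw) = t0 :: (A ++ tw).tail := by
        conv_lhs => rw [← List.cons_head_tail hAne]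
        rw [ht0A]
      have hRcons : A ++ Rm = t0 :: ((A ++ tw).tail ++ Rm') := by
        rw [← hR]
        conv_lhs => rw [ht0head]
        rfl
      have ht0min : ∀ t' ∈ A ++ Rm, t0 ≤ t' := by
        intro t' ht'
        have hsR : (A ++ Rm).Pairwise (· ≤ ·) := hsort
        rw [hRcons] at hsR ht'
        rcases List.mem_cons.1 ht' with rfl | ht'
        · exact le_refl _
        · exact (List.pairwise_cons.1 hsR).1 t' ht'
      rw [hgd]
      by_cases hng : t0 ≤ w
      · rw [if_pos hng]
        -- assign the easiest pending task to w, no pill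
        have hstep := pv_stepB_nopill (s := s) (p := p) (t := t0) (w := w)
          (T := (↑(A ++ Rm) : Multiset Int)) (W := (↑(w :: ws') : Multiset Int))
          (by rw [hRcons]; exact Multiset.mem_coe.2 List.mem_cons_self)
          (by intro t' ht'; exact ht0min t' (by exact_mod_cast ht'))
          (Multiset.mem_coe.2 List.mem_cons_self)
          (by
            intro w' hw'
            rcases List.mem_cons.1 (Multiset.mem_coe.1 hw') with rfl | hw'
            · rfl
            · exact hwmin w' hw')
          hng
        have herase1 : ((↑(A ++ Rm) : Multiset Int)).erase t0 = ↑((A ++ tw).tail ++ Rm') := by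
          rw [hRcons, ← Multiset.cons_coe, Multiset.erase_cons_head]
        have herase2 : ((↑(w :: ws') : Multiset Int)).erase w = ↑ws' := by
          rw [← Multiset.cons_coe, Multiset.erase_cons_head]
        rw [hstep, herase1, herase2]
        have htail : buf'.drop (head + 1).toNat = (A ++ tw).tail := by
          rw [show (head + 1).toNat = head.toNat + 1 by omega,
            List.drop_add_one_eq_tail_drop, hA']
        have := ih j' buf' (head + 1) p hws' (by omega) (by omega)
          (by rw [hbuf']; simp only [List.length_append]; omega)
          (by
            rw [htail, hRm'']
            have : ((A ++ tw).tail ++ Rm').Pairwise (· ≤ ·) := by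
              have hsR : (A ++ Rm).Pairwise (· ≤ ·) := hsort
              rw [hRcons] at hsR
              exact (List.pairwise_cons.1 hsR).2
            exact this)
          (by
            rw [htail]
            intro a ha w' hw'
            exact hboundA' a (List.mem_of_mem_tail ha) w'
              (List.mem_cons_of_mem _ hw'))
          (by
            rw [htail, hRm'']
            have h1 := congrArg List.length ht0head
            have h2 := congrArg List.length htwRm
            simp only [List.length_append, List.length_cons] at h1 h2 hlen ⊢
            push_cast at hlen ⊢
            omega)
        rw [htail, hRm''] at this
        exact this
      · rw [if_neg hng]
        have hwall : ∀ t' ∈ A ++ Rm, w < t' := by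
          intro t' ht'
          have := ht0min t' ht'
          omega
        by_cases hp0 : p = 0
        · rw [if_pos (by simpa using hp0)]
          refine iff_of_false (by simp) ?_
          subst hp0
          exact pv_fail_w_nopill (w := w) (by simp)
            (by intro t' ht'; exact hwall t' (by exact_mod_cast ht'))
        · rw [if_neg (by simpa using hp0)]
          have hbne : buf' ≠ [] := by
            intro hcon
            rw [hcon] at hhlt
            simp at hhlt
          set t1 := (A ++ tw).getLast hAne with ht1
          have hpop : ((PySem.List.pop? buf' (-1)).getD (0, buf')).2 = buf'.dropLast := by
            conv_lhs => rw [← List.dropLast_concat_getLast hbne]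
            rw [PySem.List.pop?_last]
            rfl
          rw [hpop]
          -- the pill branch is reachable only when boost = s > 0
          have ht1mem : t1 ∈ A ++ tw := List.getLast_mem hAne
          have ht1le : t1 ≤ w + boost := hboundA' t1 ht1mem w List.mem_cons_self
          have hsubR : ∀ x ∈ A ++ tw, x ∈ A ++ Rm := by
            intro x hx
            rcases List.mem_append.1 hx with hx | hx
            · exact List.mem_append.2 (Or.inl hx)
            · refine List.mem_append.2 (Or.inr ?_)
              rw [← htwRm]
              exact List.mem_append.2 (Or.inl hx)
          have hwt1 : w < t1 := hwall t1 (hsubR t1 ht1mem)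
          have hbs : boost = s := by
            rw [hbo]
            rw [hbo] at ht1le
            split_ifs at ht1le ⊢ with h
            · rfl
            · omega
          have hsort' : ((A ++ tw) ++ Rm').Pairwise (· ≤ ·) := by rw [hR]; exact hsort
          have hA'twsorted : (A ++ tw).Pairwise (· ≤ ·) := (List.pairwise_append.1 hsort').1
          have hstep := pv_stepB_pill (s := s) (p := p) (t1 := t1) (w := w)
            (T := (↑(A ++ Rm) : Multiset Int)) (W := (↑(w :: ws') : Multiset Int))
            (Multiset.mem_coe.2 List.mem_cons_self)
            (by
              intro w' hw'
              rcases List.mem_cons.1 (Multiset.mem_coe.1 hw') with rfl | hw'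
              · rfl
              · exact hwmin w' hw')
            (by intro t' ht'; exact hwall t' (by exact_mod_cast ht'))
            (by exact_mod_cast hsubR t1 ht1mem)
            (by omega)
            (by
              intro t' ht' hcase
              have ht'' : t' ∈ (A ++ tw) ++ Rm' := by
                rw [hR]
                exact_mod_cast ht'
              rcases List.mem_append.1 ht'' with h | h
              · exact pv_sorted_le_getLast hA'twsorted hAne t' h
              · have := hRm'gt t' h
                omega)
            hp0
          have herase1 : ((↑(A ++ Rm) : Multiset Int)).erase t1 = ↑((A ++ tw).dropLast ++ Rm') := by
            have hsplit : A ++ Rm = (A ++ tw).dropLast ++ (t1 :: Rm') := by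
              conv_lhs => rw [← hR]
              conv_lhs =>
                rw [show A ++ tw = (A ++ tw).dropLast ++ [t1] by
                  rw [ht1]; exact (List.dropLast_concat_getLast hAne).symm]
              rw [List.append_assoc]
              rfl
            rw [hsplit, Multiset.coe_eq_coe.2 (List.perm_middle (a := t1)
              (l₁ := (A ++ tw).dropLast) (l₂ := Rm')), ← Multiset.cons_coe,
              Multiset.erase_cons_head]
          have herase2 : ((↑(w :: ws') : Multiset Int)).erase w = ↑ws' := by
            rw [← Multiset.cons_coe, Multiset.erase_cons_head]
          rw [hstep, herase1, herase2]
          have hdropA : buf'.dropLast.drop head.toNat = (A ++ tw).dropLast := by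
            rw [pv_drop_dropLast, hA']
          have hlen1 : (A ++ tw).length = (A ++ tw).dropLast.length + 1 := by
            rw [List.length_dropLast]
            have : (A ++ tw).length ≠ 0 := by
              intro hcon
              exact hAne (List.eq_nil_of_length_eq_zero hcon)
            omega
          have := ih j' buf'.dropLast head (p - 1) hws' (by omega) hh
            (by rw [List.length_dropLast]; omega)
            (by
              rw [hdropA, hRm'']
              exact hsort'.sublist (List.Sublist.append (List.dropLast_sublist _)
                (List.Sublist.refl _)))
            (by
              rw [hdropA]
              intro a ha w' hw'
              exact hboundA' a ((List.dropLast_sublist (A ++ tw)).subset ha) w'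
                (List.mem_cons_of_mem _ hw'))
            (by
              rw [hdropA, hRm'']
              have h2 := congrArg List.length htwRm
              simp only [List.length_append, List.length_cons] at h2 hlen hlen1 ⊢
              push_cast at hlen ⊢
              omega)
          rw [hdropA, hRm''] at this
          exact this

-- ---- the two feasibility checks agree, hence the two searches agree ----

lemma pvCan_eq (tasks workers : List Int) (pills s k : Int)
    (hts : tasks.Pairwise (· ≤ ·)) (hws : workers.Pairwise (· ≤ ·))
    (hk0 : 0 ≤ k) (hkn : k ≤ (tasks.length : Int)) (hkm : k ≤ (workers.length : Int)) :
    pvACan tasks workers pills s k = pvBCan tasks workers pills s (if 0 < s then s else 0) k := by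
  rw [pvACan, pvBCan]
  rw [PySem.List.slice_to tasks hk0, PySem.List.slice_from workers (by omega)]
  set T := tasks.take k.toNat with hT
  set W := workers.drop ((workers.length : Int) - k).toNat with hW
  have hTlen : T.length = k.toNat := by rw [hT, List.length_take]; omega
  have hWlen : W.length = k.toNat := by rw [hW, List.length_drop]; omega
  have hTsort : T.Pairwise (· ≤ ·) := hts.sublist (List.take_sublist _ _)
  have hWsort : W.Pairwise (· ≤ ·) := hws.sublist (List.drop_sublist _ _)
  have hiffA := pvACanGo_iff s T.reverse W pills
    (by rw [List.pairwise_reverse]; exact hTsort) hWsort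
    (by rw [List.length_reverse]; omega)
  have hiffB := pvBCanGo_iff s (if 0 < s then s else 0) rfl T W 0 [] 0 pills hWsort
    (le_refl 0) (le_refl 0) (by simp) (by simpa using hTsort) (by simp)
    (by simp; omega)
  rw [show k = ((T.length : Nat) : Int) by omega]
  apply Bool.coe_iff_coe.1
  rw [hiffA, hiffB]
  simp only [Int.toNat_zero, List.drop_zero, List.drop_nil, List.nil_append]
  rw [Multiset.coe_reverse]
lemma pvSearch_eq (tasks workers : List Int) (pills s : Int)
    (hts : tasks.Pairwise (· ≤ ·)) (hws : workers.Pairwise (· ≤ ·)) :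
    ∀ (fuel : Nat) (low high : Int), 0 ≤ low →
      high ≤ min (tasks.length : Int) (workers.length : Int) →
      pvASearch tasks workers pills s fuel low high
        = pvBSearch tasks workers pills s (if 0 < s then s else 0) fuel low high := by
  intro fuel
  induction fuel with
  | zero => intro low high _ _; rw [pvASearch, pvBSearch]
  | succ fuel ih =>
    intro low high h0 hh
    simp only [pvASearch, pvBSearch]
    by_cases hlh : low < high
    · rw [if_pos hlh, if_pos hlh]
      set mid := PySem.Int.floordiv (low + high + 1) 2 with hmid
      have hb1 : low + 1 ≤ mid := by
        rw [hmid, PySem.Int.le_floordiv_iff_mul_le (by omega)]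
        omega
      have hb2 : mid ≤ high := by
        have h := (PySem.Int.floordiv_lt_iff_lt_mul
          (a := low + high + 1) (b := 2) (q := high + 1) (by omega)).2 (by omega)
        omega
      rw [pvCan_eq tasks workers pills s mid hts hws (by omega) (by omega) (by omega)]
      by_cases hcan : pvBCan tasks workers pills s (if 0 < s then s else 0) mid = true
      · rw [if_pos hcan, if_pos hcan]
        exact ih mid high (by omega) hh
      · rw [if_neg hcan, if_neg hcan]
        exact ih low (mid - 1) h0 (by omega)
    · rw [if_neg hlh, if_neg hlh]

theorem maxTaskAssign_manual_bisect_spec : Claim_equal_maxTaskAssign_manual_bisect := by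
  intro tasks workers pills strength _
  show maxTaskAssign_manual_bisect tasks workers pills strength
    = maxTaskAssign_manual_bisect_alt tasks workers pills strength
  simp only [maxTaskAssign_manual_bisect, maxTaskAssign_manual_bisect_alt]
  exact pvSearch_eq (PySem.List.sorted tasks (fun x => x) false)
    (PySem.List.sorted workers (fun x => x) false) pills strength
    (by simpa using PySem.List.sorted_pairwise tasks (fun x => x))
    (by simpa using PySem.List.sorted_pairwise workers (fun x => x))
    _ 0 _ (le_refl 0) (le_refl _)
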